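-- pv_equiv track=rewrite | github.com/cry999/AtCoder | beginner/066/C.py | pushpush
-- ===== SOURCE A (Python) =====
-- def pushpush(N: int, A: list)->list:
--     b = []
--     for i, a in enumerate(reversed(A)):
--         if i % 2 == 0:
--             b.append(a)
--     for i, a in enumerate(A):
--         if i % 2 == N % 2:
--             b.append(a)
--     return b
-- ===== SOURCE B (Python) =====
-- def pushpush(N: int, A: list) -> list:
--     # no loops: the two halves of the answer are exactly the extended slices
--     # A[::-2] (every second element from the back) and A[N % 2::2]
--     return A[::-2] + A[N % 2::2]
-- ===== Notes on version B (the rewrite author's own statement) =====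
-- stated objective: idiomatic
-- what changed: A builds the result with two enumerate loops that filter indices by parity (over reversed(A), then over A); B has no loops at all and returns the concatenation of two extended slices, A[::-2] + A[N % 2::2].
import Mathlib
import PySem

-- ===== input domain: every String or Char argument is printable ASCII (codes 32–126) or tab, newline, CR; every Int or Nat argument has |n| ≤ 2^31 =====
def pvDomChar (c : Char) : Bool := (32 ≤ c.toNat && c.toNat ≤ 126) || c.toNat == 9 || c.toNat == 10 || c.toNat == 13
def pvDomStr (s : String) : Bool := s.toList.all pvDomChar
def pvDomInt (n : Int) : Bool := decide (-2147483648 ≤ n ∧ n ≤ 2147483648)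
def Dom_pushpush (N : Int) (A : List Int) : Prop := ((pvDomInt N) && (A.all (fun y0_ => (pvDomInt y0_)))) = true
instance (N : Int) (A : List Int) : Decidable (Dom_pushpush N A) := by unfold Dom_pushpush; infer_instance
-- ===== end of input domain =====

-- B replaces A's two enumerate loops filtering indices by parity with two extended
-- slices, A[::-2] + A[N % 2::2], with no loop at all (objective: idiomatic).

-- ===== PORT A =====
def pushpush (N : Int) (A : List Int) : List Int :=
  -- b = []; for i, a in enumerate(reversed(A)): if i % 2 == 0: b.append(a)
  let b := (PySem.List.enumerate A.reverse).foldl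
    (fun b ia => if PySem.Int.mod ia.1 2 == 0 then b ++ [ia.2] else b) []
  -- for i, a in enumerate(A): if i % 2 == N % 2: b.append(a)
  (PySem.List.enumerate A).foldl
    (fun b ia => if PySem.Int.mod ia.1 2 == PySem.Int.mod N 2 then b ++ [ia.2] else b) b

-- ===== PORT B =====
def pushpush_alt (N : Int) (A : List Int) : List Int :=
  -- return A[::-2] + A[N % 2::2]   (slices on a list never raise: getD [] is never reached)
  (PySem.List.slice? A none none (-2)).getD [] ++
  (PySem.List.slice? A (some (PySem.Int.mod N 2)) none 2).getD []

-- ===== PRECONDITION & SPEC =====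
def Spec_pushpush (N : Int) (A : List Int) (out : List Int) : Prop := out = pushpush_alt N A
instance (N : Int) (A : List Int) (out : List Int) : Decidable (Spec_pushpush N A out) := by unfold Spec_pushpush; infer_instance

-- ===== CLAIM (what is proved, stated in full; the proofs are below) =====
def Claim_equal_pushpush : Prop := ∀ (N : Int) (A : List Int), Dom_pushpush N A → Spec_pushpush N A (pushpush N A)

-- ===== LEMMAS AND PROOFS =====

-- the common value of both computations: every second element, starting with the first
def everyOther {α : Type} : List α → List α
  | [] => []
  | [a] => [a]
  | a :: _ :: t => a :: everyOther t

-- Python's % with divisor 2 is Int.emod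
lemma pymod_two (x : Int) : PySem.Int.mod x 2 = x % 2 := by
  simp [PySem.Int.mod, Int.fmod_eq_emod]

-- parity filters over an enumeration are everyOther of the list (resp. of its tail)
lemma enum_parity {α : Type} (xs : List α) (s : Int) :
    (((PySem.List.enumerate xs s).filter (fun ia => ia.1 % 2 == s % 2)).map Prod.snd
      = everyOther xs)
    ∧ (((PySem.List.enumerate xs s).filter (fun ia => ia.1 % 2 == (s + 1) % 2)).map Prod.snd
      = everyOther (xs.drop 1)) := by
  induction xs generalizing s with
  | nil => simp [PySem.List.enumerate_nil, everyOther]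
  | cons x t ih =>
    have h2 : (s + 1 + 1) % 2 = s % 2 := by omega
    have hne : ¬ (s % 2 = (s + 1) % 2) := by omega
    constructor
    · have := (ih (s + 1)).2
      rw [h2] at this
      cases t with
      | nil =>
        simp [PySem.List.enumerate_cons, PySem.List.enumerate_nil, everyOther]
      | cons y u =>
        simp only [PySem.List.enumerate_cons, List.filter_cons, beq_self_eq_true,
          if_pos, List.map_cons] at this ⊢
        simp only [List.drop_one, List.tail_cons] at this
        rw [this]
        rfl
    · have := (ih (s + 1)).1
      simp only [PySem.List.enumerate_cons, List.filter_cons]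
      have hb : ((s % 2 == (s + 1) % 2) : Bool) = false := by
        simp [hne]
      rw [hb]
      simp only [if_neg Bool.false_ne_true, this, List.drop_one, List.tail_cons]

-- core: reading indices 0,2,4,… is everyOther
lemma range_core {α : Type} (xs : List α) :
    (List.range ((xs.length + 1) / 2)).filterMap (fun k => xs[2 * k]?) = everyOther xs := by
  induction xs using everyOther.induct with
  | case1 => simp [everyOther]
  | case2 a => simp [everyOther, List.range_succ]
  | case3 a b t ih =>
    have hlen : ((a :: b :: t).length + 1) / 2 = (t.length + 1) / 2 + 1 := by
      simp [List.length_cons]; omega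
    rw [hlen, List.range_succ_eq_map]
    simp only [List.filterMap_cons, List.filterMap_map]
    have : (fun k => (a :: b :: t)[2 * (k + 1)]?) = (fun k : Nat => t[2 * k]?) := by
      funext k
      have h : 2 * (k + 1) = 2 * k + 1 + 1 := by omega
      rw [h]
      simp
    simp only [Function.comp, Nat.succ_eq_add_one, this]
    simp [everyOther, ih]

-- reading indices s, s+2, … is everyOther of the drop
lemma range_fwd {α : Type} (xs : List α) (s : Nat) :
    (List.range ((xs.length - s + 1) / 2)).filterMap (fun k => xs[s + 2 * k]?)
      = everyOther (xs.drop s) := by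
  have h := range_core (xs.drop s)
  rw [List.length_drop] at h
  rw [← h]
  apply List.filterMap_congr
  intro k _
  rw [List.getElem?_drop]

-- reading indices len-1, len-3, … is everyOther of the reverse
lemma range_bwd {α : Type} (xs : List α) :
    (List.range ((xs.length + 1) / 2)).filterMap (fun k => xs[xs.length - 1 - 2 * k]?)
      = everyOther xs.reverse := by
  have h := range_core xs.reverse
  rw [List.length_reverse] at h
  rw [← h]
  cases xs with
  | nil => simp
  | cons x t =>
    apply List.filterMap_congr
    intro k hk
    rw [List.mem_range] at hk
    have hlt : 2 * k < (x :: t).length := by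
      simp only [List.length_cons] at hk ⊢; omega
    rw [List.getElem?_reverse hlt]

-- A[::-2] evaluated: every second element of the reverse
lemma slice_neg_two {α : Type} (xs : List α) :
    PySem.List.slice? xs none none (-2) = some (everyOther xs.reverse) := by
  simp only [PySem.List.slice?, PySem.List.sliceIndices]
  norm_num
  have hc : (if 0 < xs.length then (((xs.length : Int) + 2 - 1) / 2).toNat else 0)
      = (xs.length + 1) / 2 := by
    split <;> omega
  rw [hc, ← range_bwd]
  apply List.filterMap_congr
  intro k hk
  rw [List.mem_range] at hk
  congr 1
  omega

-- A[m::2] for m ∈ {0,1} evaluated: every second element of the drop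
lemma slice_fwd {α : Type} (xs : List α) (m : Int) (hm : m = 0 ∨ m = 1) :
    PySem.List.slice? xs (some m) none 2 = some (everyOther (xs.drop m.toNat)) := by
  have hnl : ¬ m < 0 := by omega
  simp only [PySem.List.slice?, PySem.List.sliceIndices]
  norm_num [hnl]
  have hmin : min m (xs.length : Int) = (((min m (xs.length : Int)).toNat : Nat) : Int) := by
    omega
  rw [hmin]
  generalize hS : (min m (xs.length : Int)).toNat = s
  have hc : (if m < (xs.length : Int) then (((xs.length : Int) - (s : Int) + 2 - 1) / 2).toNat else 0)
      = (xs.length - s + 1) / 2 := by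
    split <;> omega
  rw [hc]
  have hdrop : xs.drop m.toNat = xs.drop s := by
    by_cases h : m.toNat ≤ xs.length
    · have : s = m.toNat := by omega
      rw [this]
    · have h1 : xs.drop m.toNat = [] := List.drop_eq_nil_of_le (by omega)
      have h2 : xs.drop s = [] := List.drop_eq_nil_of_le (by omega)
      rw [h1, h2]
  rw [hdrop, ← range_fwd]
  apply List.filterMap_congr
  intro k hk
  congr 1

-- ===== VERDICT (by name: the statement is the Claim_ definition above) =====
theorem pushpush_spec : Claim_equal_pushpush := by
  intro N A _
  show pushpush N A = pushpush_alt N A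
  unfold pushpush pushpush_alt
  rw [PySem.List.foldl_append_if, PySem.List.foldl_append_if, List.nil_append]
  have hfrontp : (fun ia : Int × Int => PySem.Int.mod ia.1 2 == 0)
      = (fun ia : Int × Int => ia.1 % 2 == (0 : Int) % 2) := by
    funext ia; rw [pymod_two]; norm_num
  have hfront : ((PySem.List.enumerate A.reverse).filter
      (fun ia => PySem.Int.mod ia.1 2 == 0)).map Prod.snd = everyOther A.reverse := by
    rw [hfrontp]; exact (enum_parity A.reverse 0).1
  rw [slice_neg_two, slice_fwd A (PySem.Int.mod N 2)
        (by rw [pymod_two]; exact Int.emod_two_eq N), Option.getD_some, Option.getD_some]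
  rcases Int.emod_two_eq N with h | h
  · have hp : (fun ia : Int × Int => PySem.Int.mod ia.1 2 == PySem.Int.mod N 2)
        = (fun ia : Int × Int => ia.1 % 2 == (0 : Int) % 2) := by
      funext ia; rw [pymod_two, pymod_two, h]; norm_num
    rw [hp, pymod_two, h]
    rw [hfront, (enum_parity A 0).1]
    simp
  · have hp : (fun ia : Int × Int => PySem.Int.mod ia.1 2 == PySem.Int.mod N 2)
        = (fun ia : Int × Int => ia.1 % 2 == ((0 : Int) + 1) % 2) := by
      funext ia; rw [pymod_two, pymod_two, h]; norm_num
    rw [hp, pymod_two, h]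
    rw [hfront, (enum_parity A 0).2]
    simp
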